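-- pv_equiv track=rewrite | github.com/cml22/serp-similarity | app.py | analyze_titles
-- ===== SOURCE A (Python) =====
-- def analyze_titles(results, keyword1, keyword2):
--     counts = {
--         "common_keyword1": 0,
--         "common_keyword2": 0,
--         "common_both": 0,
--     }
--
--     urls_common = {url: title for url, title in results[0]}  # SERP 1
--     urls_non_common = {url: title for url, title in results[1]}  # SERP 2
--
--     for url, title in urls_common.items():
--         if keyword1.lower() in title.lower() and keyword2.lower() in title.lower():
--             counts["common_both"] += 1
--         elif keyword1.lower() in title.lower():
--             counts["common_keyword1"] += 1
--         elif keyword2.lower() in title.lower():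
--             counts["common_keyword2"] += 1
--
--     return counts
-- ===== SOURCE B (Python) =====
-- def analyze_titles(results, keyword1, keyword2):
--     urls_common = {url: title for url, title in results[0]}
--     urls_non_common = {url: title for url, title in results[1]}  # SERP 2 (kept: preserves IndexError on short input)
--     k1 = keyword1.lower()
--     k2 = keyword2.lower()
--     titles = [title.lower() for title in urls_common.values()]
--     return {
--         "common_keyword1": sum(1 for t in titles if k1 in t and k2 not in t),
--         "common_keyword2": sum(1 for t in titles if k2 in t and k1 not in t),
--         "common_both": sum(1 for t in titles if k1 in t and k2 in t),
--     }
-- ===== Notes on version B (the rewrite author's own statement) =====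
-- stated objective: simpler
-- what changed: Replaces the stateful if/elif counter loop with three independent summed generator expressions over the lowered titles (keywords and titles lowered once, elif turned into explicit exclusion guards), returning the dict built directly from the three counts.
import Mathlib
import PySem

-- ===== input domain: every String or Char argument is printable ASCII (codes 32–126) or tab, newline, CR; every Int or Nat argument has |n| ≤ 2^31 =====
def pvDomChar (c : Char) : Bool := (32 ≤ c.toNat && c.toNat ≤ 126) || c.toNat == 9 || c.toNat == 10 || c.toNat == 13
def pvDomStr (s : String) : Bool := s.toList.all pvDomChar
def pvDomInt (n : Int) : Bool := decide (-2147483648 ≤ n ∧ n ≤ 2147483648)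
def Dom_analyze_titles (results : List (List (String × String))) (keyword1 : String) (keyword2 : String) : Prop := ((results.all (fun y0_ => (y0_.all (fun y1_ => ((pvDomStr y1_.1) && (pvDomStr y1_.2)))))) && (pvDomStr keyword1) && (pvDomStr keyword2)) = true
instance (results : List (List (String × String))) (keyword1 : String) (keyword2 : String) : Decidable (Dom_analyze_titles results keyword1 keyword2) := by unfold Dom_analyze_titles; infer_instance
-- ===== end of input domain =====

-- B replaces A's stateful if/elif counter loop with three independent counts over the lowered titles (simpler decomposition; same cost).


-- ===== PORT A =====
def analyze_titles (results : List (List (String × String))) (keyword1 : String) (keyword2 : String) : List (String × Int) :=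
  match results with
  | serp1 :: serp2 :: _ =>   -- results[0], results[1]; shorter input raises IndexError (excluded by Pre_)
    let counts : PySem.Dict String Int :=
      PySem.Dict.ofList [("common_keyword1", 0), ("common_keyword2", 0), ("common_both", 0)]
    let urls_common : PySem.Dict String String := PySem.Dict.ofList serp1
    let _urls_non_common : PySem.Dict String String := PySem.Dict.ofList serp2
    let counts := (PySem.Dict.items urls_common).foldl (fun counts ut =>
      if PySem.Str.isIn (PySem.Str.lower keyword1) (PySem.Str.lower ut.2)
          && PySem.Str.isIn (PySem.Str.lower keyword2) (PySem.Str.lower ut.2) then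
        PySem.Dict.modify counts "common_both" 0 (· + 1)
      else if PySem.Str.isIn (PySem.Str.lower keyword1) (PySem.Str.lower ut.2) then
        PySem.Dict.modify counts "common_keyword1" 0 (· + 1)
      else if PySem.Str.isIn (PySem.Str.lower keyword2) (PySem.Str.lower ut.2) then
        PySem.Dict.modify counts "common_keyword2" 0 (· + 1)
      else counts) counts
    PySem.Dict.items counts
  | _ => []

-- ===== PORT B =====
def analyze_titles_alt (results : List (List (String × String))) (keyword1 : String) (keyword2 : String) : List (String × Int) :=
  match results with
  | [] => []
  | serp1 :: rest =>
    match rest with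
    | [] => []
    | serp2 :: _ =>
    let urls_common : PySem.Dict String String := PySem.Dict.ofList serp1
    let _urls_non_common : PySem.Dict String String := PySem.Dict.ofList serp2
    let k1 := PySem.Str.lower keyword1
    let k2 := PySem.Str.lower keyword2
    let titles := (PySem.Dict.values urls_common).map PySem.Str.lower
    [("common_keyword1", (titles.countP (fun t => PySem.Str.isIn k1 t && !PySem.Str.isIn k2 t) : Int)),
     ("common_keyword2", (titles.countP (fun t => PySem.Str.isIn k2 t && !PySem.Str.isIn k1 t) : Int)),
     ("common_both", (titles.countP (fun t => PySem.Str.isIn k1 t && PySem.Str.isIn k2 t) : Int))]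

-- ===== PRECONDITION & SPEC =====
-- A indexes results[0] and results[1]: fewer than two SERPs raises IndexError.
def Pre_analyze_titles (results : List (List (String × String))) (keyword1 : String) (keyword2 : String) : Prop :=
  2 ≤ results.length
instance (results : List (List (String × String))) (keyword1 : String) (keyword2 : String) : Decidable (Pre_analyze_titles results keyword1 keyword2) := by unfold Pre_analyze_titles; infer_instance
def pvWitness_analyze_titles : (List (List (String × String))) × String × String :=
  ([[("u1", "Best cat food"), ("u2", "dog and cat")], [("u3", "dog news")]], "cat", "dog")
def Spec_analyze_titles (results : List (List (String × String))) (keyword1 : String) (keyword2 : String) (out : List (String × Int)) : Prop := out = analyze_titles_alt results keyword1 keyword2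
instance (results : List (List (String × String))) (keyword1 : String) (keyword2 : String) (out : List (String × Int)) : Decidable (Spec_analyze_titles results keyword1 keyword2 out) := by unfold Spec_analyze_titles; infer_instance

-- ===== CLAIM (what is proved, stated in full; the proofs are below) =====
def Claim_equal_analyze_titles : Prop := ∀ (results : List (List (String × String))) (keyword1 : String) (keyword2 : String), Dom_analyze_titles results keyword1 keyword2 → Pre_analyze_titles results keyword1 keyword2 → Spec_analyze_titles results keyword1 keyword2 (analyze_titles results keyword1 keyword2)

-- ===== LEMMAS AND PROOFS =====

-- counts["common_both"] += 1 etc., computed on the literal three-key dict (keys are closed strings)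
lemma modify_both (a b c : Int) :
    PySem.Dict.modify (⟨[("common_keyword1", a), ("common_keyword2", b), ("common_both", c)]⟩ : PySem.Dict String Int) "common_both" 0 (· + 1)
    = ⟨[("common_keyword1", a), ("common_keyword2", b), ("common_both", c + 1)]⟩ := rfl

lemma modify_k1 (a b c : Int) :
    PySem.Dict.modify (⟨[("common_keyword1", a), ("common_keyword2", b), ("common_both", c)]⟩ : PySem.Dict String Int) "common_keyword1" 0 (· + 1)
    = ⟨[("common_keyword1", a + 1), ("common_keyword2", b), ("common_both", c)]⟩ := rfl

lemma modify_k2 (a b c : Int) :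
    PySem.Dict.modify (⟨[("common_keyword1", a), ("common_keyword2", b), ("common_both", c)]⟩ : PySem.Dict String Int) "common_keyword2" 0 (· + 1)
    = ⟨[("common_keyword1", a), ("common_keyword2", b + 1), ("common_both", c)]⟩ := rfl

-- the if/elif loop characterised: each key ends at its start value plus the count of its (mutually exclusive) condition
lemma loop_counts (k1 k2 : String) (l : List (String × String)) (a b c : Int) :
    l.foldl (fun counts (ut : String × String) =>
      if PySem.Str.isIn k1 (PySem.Str.lower ut.2) && PySem.Str.isIn k2 (PySem.Str.lower ut.2) then
        PySem.Dict.modify counts "common_both" 0 (· + 1)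
      else if PySem.Str.isIn k1 (PySem.Str.lower ut.2) then
        PySem.Dict.modify counts "common_keyword1" 0 (· + 1)
      else if PySem.Str.isIn k2 (PySem.Str.lower ut.2) then
        PySem.Dict.modify counts "common_keyword2" 0 (· + 1)
      else counts)
      (⟨[("common_keyword1", a), ("common_keyword2", b), ("common_both", c)]⟩ : PySem.Dict String Int)
    = ⟨[("common_keyword1", a + (l.countP (fun ut => PySem.Str.isIn k1 (PySem.Str.lower ut.2) && !PySem.Str.isIn k2 (PySem.Str.lower ut.2)) : Int)),
        ("common_keyword2", b + (l.countP (fun ut => PySem.Str.isIn k2 (PySem.Str.lower ut.2) && !PySem.Str.isIn k1 (PySem.Str.lower ut.2)) : Int)),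
        ("common_both", c + (l.countP (fun ut => PySem.Str.isIn k1 (PySem.Str.lower ut.2) && PySem.Str.isIn k2 (PySem.Str.lower ut.2)) : Int))]⟩ := by
  induction l generalizing a b c with
  | nil => simp [List.countP]
  | cons ut rest ih =>
    simp only [List.foldl_cons, List.countP_cons]
    cases h1 : PySem.Str.isIn k1 (PySem.Str.lower ut.2) <;>
      cases h2 : PySem.Str.isIn k2 (PySem.Str.lower ut.2) <;>
        simp only [h1, h2, Bool.true_and, Bool.false_and, Bool.and_true, Bool.and_false,
          Bool.not_true, Bool.not_false, Bool.false_eq_true, if_true, if_false,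
          modify_both, modify_k1, modify_k2, ite_true, ite_false] <;>
        first
          | exact ih a b c
          | (rw [ih]; congr 1 <;> push_cast <;> ring_nf)

-- ===== VERDICT (by name: the statement is the Claim_ definition above) =====
theorem analyze_titles_spec : Claim_equal_analyze_titles := by
  intro results keyword1 keyword2 _hdom hpre
  unfold Spec_analyze_titles analyze_titles analyze_titles_alt
  match results with
  | [] => simp [Pre_analyze_titles] at hpre
  | [_] => simp [Pre_analyze_titles] at hpre
  | serp1 :: serp2 :: rest =>
    simp only []
    rw [show (PySem.Dict.ofList [("common_keyword1", (0:Int)), ("common_keyword2", 0), ("common_both", 0)])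
        = (⟨[("common_keyword1", 0), ("common_keyword2", 0), ("common_both", 0)]⟩ : PySem.Dict String Int) from rfl]
    rw [loop_counts]
    simp [PySem.Dict.values, List.countP_map, Function.comp_def]
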